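-- pv_equiv track=rewrite | github.com/iffahMLP/ETA-System-webapp | services/order_processor.py | group_skus_by_vendor
-- ===== SOURCE A (Python) =====
-- def group_skus_by_vendor(line_items):
--     sku_by_vendor = {}
--     has_vin_by_vendor = {}
--     for item in line_items:
--         sku, vendor, vin = item.get('sku', 'Unknown SKU'), item.get('vendor', 'Unknown Vendor'), item.get('vin', '')
--         if vendor not in sku_by_vendor:
--             sku_by_vendor[vendor] = [sku]
--             has_vin_by_vendor[vendor] = bool(vin)
--         else:
--             sku_by_vendor[vendor].append(sku)
--             if vin:
--                 has_vin_by_vendor[vendor] = True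
--     return sku_by_vendor, has_vin_by_vendor
-- ===== SOURCE B (Python) =====
-- def group_skus_by_vendor(line_items):
--     # one grouping pass, then each result dict is derived from the groups
--     groups = {}
--     for item in line_items:
--         groups.setdefault(item.get('vendor', 'Unknown Vendor'), []).append(item)
--     sku_by_vendor = {v: [it.get('sku', 'Unknown SKU') for it in items]
--                      for v, items in groups.items()}
--     has_vin_by_vendor = {v: any(it.get('vin', '') for it in items)
--                          for v, items in groups.items()}
--     return sku_by_vendor, has_vin_by_vendor
-- ===== Notes on version B (the rewrite author's own statement) =====
-- stated objective: simpler
-- what changed: B replaces A's interleaved maintenance of two result dicts (branching on first-vs-later occurrence and conditionally flipping the vin flag) with one grouping pass collecting items per vendor, from which both result dicts are then derived by plain comprehensions (map of skus, any over vin truthiness).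
import Mathlib
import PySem

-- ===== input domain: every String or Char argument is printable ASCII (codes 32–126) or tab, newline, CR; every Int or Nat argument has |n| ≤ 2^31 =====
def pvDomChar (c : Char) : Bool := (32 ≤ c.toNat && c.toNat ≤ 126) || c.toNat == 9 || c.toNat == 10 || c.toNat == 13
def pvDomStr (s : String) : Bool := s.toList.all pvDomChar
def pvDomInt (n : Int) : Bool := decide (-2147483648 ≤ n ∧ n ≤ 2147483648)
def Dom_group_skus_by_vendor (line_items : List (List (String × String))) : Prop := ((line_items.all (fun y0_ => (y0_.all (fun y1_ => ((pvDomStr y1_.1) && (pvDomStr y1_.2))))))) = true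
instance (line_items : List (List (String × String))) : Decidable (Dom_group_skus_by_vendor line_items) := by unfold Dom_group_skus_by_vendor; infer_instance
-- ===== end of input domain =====

-- B groups the line items by vendor in one pass and then derives both result dicts
-- from the groups by plain comprehensions (objective: simpler decomposition).

-- shared primitive: item.get(key, default) on the item dict (assoc list, first match)
def pyItemGet (item : List (String × String)) (k dflt : String) : String :=
  match item with
  | [] => dflt
  | (k', v) :: rest => if k' == k then v else pyItemGet rest k dflt

-- ===== PORT A =====
def group_skus_by_vendor (line_items : List (List (String × String))) : (List (String × List String)) × (List (String × Bool)) :=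
  let st := line_items.foldl
    (fun (st : PySem.Dict String (List String) × PySem.Dict String Bool) item =>
      let sku := pyItemGet item "sku" "Unknown SKU"
      let vendor := pyItemGet item "vendor" "Unknown Vendor"
      let vin := pyItemGet item "vin" ""
      if st.1.contains vendor = false then
        (st.1.insert vendor [sku], st.2.insert vendor (vin != ""))
      else
        (st.1.modify vendor [] (· ++ [sku]),
         if vin != "" then st.2.insert vendor true else st.2))
    (PySem.Dict.empty, PySem.Dict.empty)
  (st.1.items, st.2.items)

-- ===== PORT B =====
-- groups.setdefault(v, []).append(item)  ≡  groups[v] = groups.get(v, []) + [item]  = Dict.modify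
-- the two dict comprehensions are ported as maps over groups.items: exact, since a
-- Dict built by modify from empty has unique keys, so the comprehension visits each key once.
def group_skus_by_vendor_alt (line_items : List (List (String × String))) : (List (String × List String)) × (List (String × Bool)) :=
  let groups : PySem.Dict String (List (List (String × String))) :=
    line_items.foldl
      (fun g item => g.modify (pyItemGet item "vendor" "Unknown Vendor") [] (· ++ [item]))
      PySem.Dict.empty
  (groups.items.map (fun p => (p.1, p.2.map (fun it => pyItemGet it "sku" "Unknown SKU"))),
   groups.items.map (fun p => (p.1, p.2.any (fun it => pyItemGet it "vin" "" != ""))))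

-- ===== PRECONDITION & SPEC =====
def Spec_group_skus_by_vendor (line_items : List (List (String × String))) (out : (List (String × List String)) × (List (String × Bool))) : Prop := out = group_skus_by_vendor_alt line_items
instance (line_items : List (List (String × String))) (out : (List (String × List String)) × (List (String × Bool))) : Decidable (Spec_group_skus_by_vendor line_items out) := by unfold Spec_group_skus_by_vendor; infer_instance

-- ===== CLAIM (what is proved, stated in full; the proofs are below) =====
def Claim_equal_group_skus_by_vendor : Prop := ∀ (line_items : List (List (String × String))), Dom_group_skus_by_vendor line_items → Spec_group_skus_by_vendor line_items (group_skus_by_vendor line_items)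

-- ===== LEMMAS AND PROOFS =====

-- map the values of a dict, keeping the key structure
def mapVals {ν ω : Type} (f : ν → ω) (g : PySem.Dict String ν) : PySem.Dict String ω :=
  PySem.Dict.mk (g.items.map (fun p => (p.1, f p.2)))

lemma contains_mapVals {ν ω : Type} (f : ν → ω) (g : PySem.Dict String ν) (k : String) :
    (mapVals f g).contains k = g.contains k := by
  simp [mapVals, PySem.Dict.contains, List.any_map, Function.comp_def]

lemma find?_mapVals {ν ω : Type} (f : ν → ω) (l : List (String × ν)) (k : String) :
    List.find? (fun p => p.1 == k) (l.map (fun p => (p.1, f p.2)))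
      = (l.find? (fun p => p.1 == k)).map (fun p => (p.1, f p.2)) := by
  induction l with
  | nil => simp
  | cons p rest ih =>
      by_cases h : p.1 == k <;> simp [List.find?, h, ih]

lemma get?_mapVals {ν ω : Type} (f : ν → ω) (g : PySem.Dict String ν) (k : String) :
    (mapVals f g).get? k = (g.get? k).map f := by
  simp only [mapVals, PySem.Dict.get?, find?_mapVals]
  cases g.items.find? (fun p => p.1 == k) <;> simp

lemma getD_mapVals {ν ω : Type} (f : ν → ω) (g : PySem.Dict String ν) (k : String) (d : ν) :
    (mapVals f g).getD k (f d) = f (g.getD k d) := by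
  simp only [PySem.Dict.getD_eq_get?_getD, get?_mapVals]
  cases g.get? k <;> simp

-- mapping values commutes with an insert (insert rewrites every occurrence of the key)
lemma mapVals_insert {ν ω : Type} (f : ν → ω) (g : PySem.Dict String ν) (k : String) (v : ν) :
    mapVals f (g.insert k v) = (mapVals f g).insert k (f v) := by
  simp only [PySem.Dict.insert, contains_mapVals]
  split_ifs with h
  · apply PySem.Dict.ext
    simp only [mapVals, List.map_map]
    apply List.map_congr_left
    intro p _
    by_cases hk : p.1 == k <;> simp [Function.comp, hk]
  · apply PySem.Dict.ext
    simp [mapVals]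

-- B's grouping value at an occupied key, rewritten through mapVals: the sku side
lemma sku_modify (g : PySem.Dict String (List (List (String × String)))) (item : List (String × String)) (v : String) :
    mapVals (fun its => its.map (fun it => pyItemGet it "sku" "Unknown SKU")) (g.modify v [] (· ++ [item]))
      = (mapVals (fun its => its.map (fun it => pyItemGet it "sku" "Unknown SKU")) g).modify v []
          (· ++ [pyItemGet item "sku" "Unknown SKU"]) := by
  simp only [PySem.Dict.modify, mapVals_insert]
  congr 1
  have := getD_mapVals (fun its => its.map (fun it => pyItemGet it "sku" "Unknown SKU")) g v []
  simp only [List.map_nil] at this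
  simp [this]

-- the vin side: any over the extended group
lemma vin_modify (g : PySem.Dict String (List (List (String × String)))) (item : List (String × String)) (v : String) :
    mapVals (fun its => its.any (fun it => pyItemGet it "vin" "" != "")) (g.modify v [] (· ++ [item]))
      = (mapVals (fun its => its.any (fun it => pyItemGet it "vin" "" != "")) g).insert v
          ((g.getD v []).any (fun it => pyItemGet it "vin" "" != "") || (pyItemGet item "vin" "" != "")) := by
  simp only [PySem.Dict.modify, mapVals_insert]
  congr 1
  simp

-- abbreviations for the two fold steps
def stepA (st : PySem.Dict String (List String) × PySem.Dict String Bool)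
    (item : List (String × String)) : PySem.Dict String (List String) × PySem.Dict String Bool :=
  let sku := pyItemGet item "sku" "Unknown SKU"
  let vendor := pyItemGet item "vendor" "Unknown Vendor"
  let vin := pyItemGet item "vin" ""
  if st.1.contains vendor = false then
    (st.1.insert vendor [sku], st.2.insert vendor (vin != ""))
  else
    (st.1.modify vendor [] (· ++ [sku]),
     if vin != "" then st.2.insert vendor true else st.2)

def stepB (g : PySem.Dict String (List (List (String × String)))) (item : List (String × String)) :
    PySem.Dict String (List (List (String × String))) :=
  g.modify (pyItemGet item "vendor" "Unknown Vendor") [] (· ++ [item])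

def F1 (g : PySem.Dict String (List (List (String × String)))) : PySem.Dict String (List String) :=
  mapVals (fun its => its.map (fun it => pyItemGet it "sku" "Unknown SKU")) g

def F2 (g : PySem.Dict String (List (List (String × String)))) : PySem.Dict String Bool :=
  mapVals (fun its => its.any (fun it => pyItemGet it "vin" "" != "")) g

lemma nodup_keys_stepB (g : PySem.Dict String (List (List (String × String)))) (item : List (String × String))
    (h : g.keys.Nodup) : (stepB g item).keys.Nodup := by
  unfold stepB PySem.Dict.modify
  exact PySem.Dict.nodup_keys_insert _ _ _ h

-- an insert of `true` at an occupied key of F2 g equals F2 of the extended group (vin truthy case),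
-- and F2 is unchanged when the new item's vin is falsy — both packaged in the step lemma below
lemma stepA_step (g : PySem.Dict String (List (List (String × String)))) (item : List (String × String))
    (hnd : g.keys.Nodup) : stepA (F1 g, F2 g) item = (F1 (stepB g item), F2 (stepB g item)) := by
  unfold stepA stepB
  simp only
  set v := pyItemGet item "vendor" "Unknown Vendor" with hv
  by_cases hc : g.contains v = false
  · -- new vendor: both sides append
    have hgD : g.getD v [] = [] := PySem.Dict.getD_of_not_contains _ _ hc
    have hc1 : (F1 g).contains v = false := by rw [F1, contains_mapVals]; exact hc
    rw [if_pos hc1]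
    unfold F1 F2
    rw [PySem.Dict.modify, mapVals_insert, mapVals_insert, hgD]
    simp
  · -- existing vendor
    have hc : g.contains v = true := by
      cases h : g.contains v
      · exact absurd h hc
      · rfl
    have hc1 : (F1 g).contains v = false ↔ False := by
      rw [F1, contains_mapVals]; simp [hc]
    rw [if_neg (by simp [hc1])]
    simp only [Prod.mk.injEq]
    refine ⟨?_, ?_⟩
    · exact (sku_modify g item v).symm
    · simp only [F2]
      rw [vin_modify]
      by_cases hvin : pyItemGet item "vin" "" != ""
      · rw [if_pos hvin]
        simp [hvin]
      · rw [if_neg hvin]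
        simp only [ne_eq, bne_iff_ne, not_not] at hvin
        have : ((g.getD v []).any (fun it => pyItemGet it "vin" "" != "") || (pyItemGet item "vin" "" != ""))
            = (g.getD v []).any (fun it => pyItemGet it "vin" "" != "") := by
          simp [hvin]
        rw [this]
        -- inserting a key's current value back at an occupied key is a no-op (keys nodup)
        apply PySem.Dict.ext
        rw [PySem.Dict.insert]
        have hcf : (mapVals (fun its => its.any (fun it => pyItemGet it "vin" "" != "")) g).contains v = true := by
          rw [contains_mapVals]; exact hc
        rw [if_pos hcf]
        have hget : (mapVals (fun its => its.any (fun it => pyItemGet it "vin" "" != "")) g).getD v false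
            = (g.getD v []).any (fun it => pyItemGet it "vin" "" != "") := by
          have := getD_mapVals (fun its => its.any (fun it => pyItemGet it "vin" "" != "")) g v []
          simpa using this
        -- rewrite each occurrence: with nodup keys the only entry with key v carries that value
        have hndm : (mapVals (fun its => its.any (fun it => pyItemGet it "vin" "" != "")) g).keys.Nodup := by
          have : (mapVals (fun its => its.any (fun it => pyItemGet it "vin" "" != "")) g).keys = g.keys := by
            simp [mapVals, PySem.Dict.keys]
          rw [this]; exact hnd
        set d := mapVals (fun its => its.any (fun it => pyItemGet it "vin" "" != "")) g with hd
        rw [← hget]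
        -- any entry (k, w) of d with k == v satisfies w = d.getD v false
        show d.items = List.map _ d.items
        symm
        refine (List.map_congr_left ?_).trans (List.map_id _)
        intro p hp
        by_cases hk : p.1 == v
        · have hkv : p.1 = v := by simpa using hk
          have hmem : (v, p.2) ∈ d.items := by rw [← hkv]; exact hp
          have hval : d.getD v false = p.2 := PySem.Dict.getD_of_mem_items d hmem hndm false
          simp only [hk, if_pos, hval, id]
          rw [← hkv]
        · simp [hk]

lemma fold_agree (l : List (List (String × String))) (g : PySem.Dict String (List (List (String × String))))
    (hnd : g.keys.Nodup) :
    l.foldl stepA (F1 g, F2 g) = (F1 (l.foldl stepB g), F2 (l.foldl stepB g)) := by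
  induction l generalizing g with
  | nil => simp
  | cons item rest ih =>
      simp only [List.foldl_cons]
      rw [stepA_step g item hnd]
      exact ih (stepB g item) (nodup_keys_stepB g item hnd)

-- ===== VERDICT (by name: the statement is the Claim_ definition above) =====
theorem group_skus_by_vendor_spec : Claim_equal_group_skus_by_vendor := by
  intro line_items _
  unfold Spec_group_skus_by_vendor group_skus_by_vendor group_skus_by_vendor_alt
  have h0 : (PySem.Dict.empty, PySem.Dict.empty) = (F1 PySem.Dict.empty, F2 PySem.Dict.empty) := by
    simp [F1, F2, mapVals, PySem.Dict.empty]
  have hfold := fold_agree line_items PySem.Dict.empty (by simp [PySem.Dict.empty, PySem.Dict.keys])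
  simp only
  rw [show (fun (st : PySem.Dict String (List String) × PySem.Dict String Bool) item =>
      let sku := pyItemGet item "sku" "Unknown SKU"
      let vendor := pyItemGet item "vendor" "Unknown Vendor"
      let vin := pyItemGet item "vin" ""
      if st.1.contains vendor = false then
        (st.1.insert vendor [sku], st.2.insert vendor (vin != ""))
      else
        (st.1.modify vendor [] (· ++ [sku]),
         if vin != "" then st.2.insert vendor true else st.2)) = stepA from rfl]
  rw [show (fun (g : PySem.Dict String (List (List (String × String)))) item =>
      g.modify (pyItemGet item "vendor" "Unknown Vendor") [] (· ++ [item])) = stepB from rfl]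
  rw [h0, hfold]
  simp [F1, F2, mapVals]
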